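-- pv_equiv track=rewrite | github.com/iktkhor/YandexContests | Training_1.0/HW 3/task 6.py | genom_proximity
-- ===== SOURCE A (Python) =====
-- def genom_proximity(genom_A, genom_B):
--     if len(genom_A) == 1 or len(genom_B) == 1:
--         return 0
--     pairs_B = set()
--     proximity = 0
--     for i in range(len(genom_B) - 1):
--         pair = genom_B[i] + genom_B[i + 1]
--         pairs_B.add(pair)
--     for i in range(len(genom_A) - 1):
--         pair = genom_A[i] + genom_A[i + 1]
--         if pair in pairs_B:
--             proximity += 1
--     return proximity
-- ===== SOURCE B (Python) =====
-- def genom_proximity(genom_A, genom_B):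
--     pairs_A = sorted(x + y for x, y in zip(genom_A, genom_A[1:]))
--     pairs_B = sorted({x + y for x, y in zip(genom_B, genom_B[1:])})
--     i = j = proximity = 0
--     while i < len(pairs_A) and j < len(pairs_B):
--         if pairs_A[i] < pairs_B[j]:
--             i += 1
--         elif pairs_A[i] > pairs_B[j]:
--             j += 1
--         else:
--             proximity += 1
--             i += 1
--     return proximity
-- ===== Notes on version B (the rewrite author's own statement) =====
-- stated objective: alternative
-- what changed: Replaces A's hash-set membership counting by a sort-and-merge algorithm: sort A's adjacent pairs (with multiplicity) and the distinct B pairs, then count matches with a two-pointer merge scan instead of per-pair set lookups.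
import Mathlib
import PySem

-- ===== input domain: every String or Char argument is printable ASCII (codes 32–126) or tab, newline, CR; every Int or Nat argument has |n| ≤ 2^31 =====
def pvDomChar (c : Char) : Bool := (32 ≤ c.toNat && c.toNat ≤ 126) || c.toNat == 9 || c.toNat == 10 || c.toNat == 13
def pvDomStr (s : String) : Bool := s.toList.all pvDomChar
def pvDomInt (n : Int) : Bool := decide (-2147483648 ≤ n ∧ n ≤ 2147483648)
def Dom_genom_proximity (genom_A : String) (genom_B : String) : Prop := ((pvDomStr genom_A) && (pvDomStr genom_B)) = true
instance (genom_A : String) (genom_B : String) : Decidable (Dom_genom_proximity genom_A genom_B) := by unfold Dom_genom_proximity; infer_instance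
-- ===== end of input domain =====

-- B replaces A's hash-set membership counting by sort-and-merge: both pair lists are
-- sorted and a two-pointer merge scan counts the matches (objective: alternative algorithm).

-- ===== PORT A =====
-- Python's 2-character pair strings genom[i] + genom[i+1] are ported as 2-element List Char
-- (exact: 2-char ASCII strings correspond bijectively and compare identically).
def genom_proximity (genom_A : String) (genom_B : String) : Int :=
  let a := genom_A.toList
  let b := genom_B.toList
  if a.length = 1 ∨ b.length = 1 then 0
  else
    let pairsB :=
      (PySem.List.pyRange 0 ((b.length : Int) - 1) 1).foldl
        (fun s i => s.add [PySem.List.pyGetD b i ' ', PySem.List.pyGetD b (i + 1) ' '])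
        (PySem.Set.ofList [])
    (PySem.List.pyRange 0 ((a.length : Int) - 1) 1).foldl
      (fun acc i =>
        if pairsB.contains [PySem.List.pyGetD a i ' ', PySem.List.pyGetD a (i + 1) ' '] then acc + 1
        else acc)
      0

-- ===== PORT B =====
-- the adjacent-pair list  [x + y for x, y in zip(g, g[1:])]
def pvPairs (l : List Char) : List (List Char) :=
  (l.zip (l.drop 1)).map (fun xy => [xy.1, xy.2])

-- the two-pointer while loop of Source B, as structural recursion on the two suffixes
-- (i += 1 drops the head of the first list, j += 1 drops the head of the second)
def pvMerge : List (List Char) → List (List Char) → Int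
  | [], _ => 0
  | _ :: _, [] => 0
  | a :: as, b :: bs =>
    if a < b then pvMerge as (b :: bs)
    else if b < a then pvMerge (a :: as) bs
    else 1 + pvMerge as (b :: bs)
termination_by x y => x.length + y.length

def genom_proximity_alt (genom_A : String) (genom_B : String) : Int :=
  let pairsA := PySem.List.sorted (pvPairs genom_A.toList) (fun x => x) false
  let pairsB := PySem.List.sorted (PySem.Set.ofList (pvPairs genom_B.toList)) (fun x => x) false
  pvMerge pairsA pairsB

-- ===== PRECONDITION & SPEC =====
def Spec_genom_proximity (genom_A : String) (genom_B : String) (out : Int) : Prop := out = genom_proximity_alt genom_A genom_B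
instance (genom_A : String) (genom_B : String) (out : Int) : Decidable (Spec_genom_proximity genom_A genom_B out) := by unfold Spec_genom_proximity; infer_instance

-- ===== CLAIM (what is proved, stated in full; the proofs are below) =====
def Claim_equal_genom_proximity : Prop := ∀ (genom_A : String) (genom_B : String), Dom_genom_proximity genom_A genom_B → Spec_genom_proximity genom_A genom_B (genom_proximity genom_A genom_B)

-- ===== LEMMAS AND PROOFS =====

theorem pvLen_pairs (l : List Char) : (pvPairs l).length = l.length - 1 := by
  simp [pvPairs, List.length_zip]

-- the indexed range loop over a string enumerates exactly its adjacent-pair list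
theorem pvRange_pairs (l : List Char) :
    (PySem.List.pyRange 0 ((l.length : Int) - 1) 1).map
        (fun i => [PySem.List.pyGetD l i ' ', PySem.List.pyGetD l (i + 1) ' '])
      = pvPairs l := by
  cases l with
  | nil => simp [PySem.List.pyRange, pvPairs]
  | cons c t =>
    have h1 : ((c :: t).length : Int) - 1 = ((t.length : ℕ) : Int) := by
      simp
    rw [h1, PySem.List.pyRange_zero_natCast]
    apply List.ext_getElem
    · simp [pvLen_pairs]
    · intro i hi _
      simp only [List.getElem_map, List.getElem_range]
      have hi' : i < t.length := by simpa using hi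
      have g1 : PySem.List.pyGetD (c :: t) ((i : Int)) ' ' = (c :: t).getD i ' ' :=
        PySem.List.pyGetD_natCast _ _ _
      have g2 : PySem.List.pyGetD (c :: t) ((i : Int) + 1) ' ' = (c :: t).getD (i + 1) ' ' := by
        have := PySem.List.pyGetD_natCast (c :: t) (i + 1) ' '
        simpa [Nat.cast_add] using this
      rw [g1, g2]
      have hlt1 : i < (c :: t).length := by simp; omega
      have hlt2 : i + 1 < (c :: t).length := by simp; omega
      rw [List.getD_eq_getElem _ _ hlt1, List.getD_eq_getElem _ _ hlt2]
      simp [pvPairs, List.getElem_zip]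

-- the two-pointer merge over a sorted list and a strictly sorted list counts
-- the elements of the first that occur in the second
theorem pvMerge_eq : ∀ (pa pb : List (List Char)),
    pa.Pairwise (fun a b => ¬ b < a) → pb.Pairwise (· < ·) →
    pvMerge pa pb = ((pa.countP (fun x => decide (x ∈ pb)) : Nat) : Int)
  | [], pb, _, _ => by simp [pvMerge]
  | a :: as, [], _, _ => by simp [pvMerge]
  | a :: as, b :: bs, ha, hb => by
    obtain ⟨ha1, ha2⟩ := List.pairwise_cons.mp ha
    obtain ⟨hb1, hb2⟩ := List.pairwise_cons.mp hb
    rcases lt_trichotomy a b with h | h | h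
    · -- a < b : a cannot occur in b :: bs
      have hnot : a ∉ b :: bs := by
        intro hmem
        rcases List.mem_cons.mp hmem with rfl | hmem
        · exact lt_irrefl a h
        · exact lt_asymm h (hb1 _ hmem)
      rw [pvMerge, if_pos h,
          pvMerge_eq as (b :: bs) ha2 hb,
          List.countP_cons_of_neg (by simpa using hnot)]
    · -- a = b : a match; advance the first pointer
      subst h
      rw [pvMerge, if_neg (lt_irrefl a), if_neg (lt_irrefl a),
          pvMerge_eq as (a :: bs) ha2 hb,
          List.countP_cons_of_pos (by simp)]
      push_cast
      ring
    · -- b < a : no element of a :: as equals b; advance the second pointer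
      have hne : ∀ x ∈ a :: as, x ∈ b :: bs ↔ x ∈ bs := by
        intro x hx
        have hbx : b < x := by
          rcases List.mem_cons.mp hx with rfl | hx
          · exact h
          · exact lt_of_lt_of_le h (not_lt.mp (ha1 _ hx))
        simp [List.mem_cons, (ne_of_lt hbx).symm]
      rw [pvMerge, if_neg (lt_asymm h), if_pos h,
          pvMerge_eq (a :: as) bs ha hb2]
      norm_cast
      exact (List.countP_congr (fun x hx => by simp [hne x hx])).symm
termination_by pa pb => pa.length + pb.length

-- B's value, in the same closed form as A's
theorem pvAlt_eq (gA gB : String) :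
    genom_proximity_alt gA gB
      = (((pvPairs gA.toList).countP
            (fun k => (PySem.Set.ofList (pvPairs gB.toList)).contains k) : Nat) : Int) := by
  unfold genom_proximity_alt
  dsimp only
  -- align the (propositionally equal) order instances of the goal with the library lemmas
  rw [show (fun (a b : List Char) => a.decidableLT b) = (LinearOrder.toDecidableLT) from
        funext fun a => funext fun b => Subsingleton.elim _ _]
  have h1 := (PySem.List.sorted_pairwise (pvPairs gA.toList) (fun x : List Char => x)).imp
    (fun h => not_lt.mpr h)
  have hle := PySem.List.sorted_pairwise (PySem.Set.ofList (pvPairs gB.toList))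
    (fun x : List Char => x)
  have hperm := @PySem.List.sorted_perm (List Char) (List Char) List.instLinearOrder.toLT
    LinearOrder.toDecidableLT (PySem.Set.ofList (pvPairs gB.toList)) (fun x => x) false
  have hnd' : List.Pairwise (fun x y : List Char => x ≠ y)
      (@PySem.List.sorted (List Char) (List Char) List.instLinearOrder.toLT
        LinearOrder.toDecidableLT (PySem.Set.ofList (pvPairs gB.toList)) (fun x => x) false) :=
    (hperm.nodup_iff).mpr (PySem.Set.nodup_ofList _)
  have h2 := (hle.and hnd').imp (fun h => lt_of_le_of_ne h.1 h.2)
  refine (pvMerge_eq _ _ h1 h2).trans ?_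
  rw [(@PySem.List.sorted_perm (List Char) (List Char) List.instLinearOrder.toLT
        LinearOrder.toDecidableLT (pvPairs gA.toList) (fun x => x) false).countP_eq]
  congr 1
  refine List.countP_congr (fun x _ => ?_)
  simp [PySem.List.mem_sorted, PySem.Set.mem_ofList, PySem.Set.contains]

theorem pvZip_len_one (l : List Char) (h : l.length = 1) : l.zip (l.drop 1) = [] := by
  cases l with
  | nil => simp
  | cons c t =>
    have : t = [] := by
      cases t with
      | nil => rfl
      | cons _ _ => simp at h
    simp [this]

-- ===== VERDICT (by name: the statement is the Claim_ definition above) =====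
theorem genom_proximity_spec : Claim_equal_genom_proximity := by
  intro gA gB _
  unfold Spec_genom_proximity
  rw [pvAlt_eq]
  unfold genom_proximity
  by_cases hg : gA.toList.length = 1 ∨ gB.toList.length = 1
  · simp only [hg, if_true]
    rcases hg with h | h
    · rw [show pvPairs gA.toList = [] from by unfold pvPairs; rw [pvZip_len_one _ h]; rfl]
      simp
    · rw [show pvPairs gB.toList = [] from by unfold pvPairs; rw [pvZip_len_one _ h]; rfl]
      simp [List.countP_eq_length_filter]
  · dsimp only
    simp only [hg, if_false]
    have hsetB : (PySem.List.pyRange 0 ((gB.toList.length : Int) - 1) 1).foldl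
        (fun s i => s.add [PySem.List.pyGetD gB.toList i ' ', PySem.List.pyGetD gB.toList (i + 1) ' '])
        (PySem.Set.ofList [])
        = PySem.Set.ofList (pvPairs gB.toList) := by
      rw [← pvRange_pairs, ← List.foldl_map]
      rfl
    rw [hsetB,
        PySem.List.foldl_count_if
          (fun i => (PySem.Set.ofList (pvPairs gB.toList)).contains
            [PySem.List.pyGetD gA.toList i ' ', PySem.List.pyGetD gA.toList (i + 1) ' ']) _ 0,
        zero_add]
    rw [show (List.countP _ (PySem.List.pyRange 0 ((gA.toList.length : Int) - 1) 1)) =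
        List.countP (fun k => (PySem.Set.ofList (pvPairs gB.toList)).contains k)
          (pvPairs gA.toList) from by rw [← pvRange_pairs gA.toList, List.countP_map]; rfl]
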